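-- pv_equiv track=rewrite | github.com/greentreegroup/glynac_data_exchange | EmailExtraction/utils.py | categorize_sender
-- ===== SOURCE A (Python) =====
-- def categorize_sender(sender_email):
--     """Categorizes the sender as Internal, Vendor, or Client based on domain."""
--
--     if not sender_email:
--         return "Unknown"  # If email is missing, categorize as Unknown
--
--     sender_email = sender_email.lower()
--
--     # Define domains
--     internal_domains = {"glynac.ai", "greentree.group", "springer.capital"}  # Your company's domain
--     vendor_domains = {"supplier.com", "thirdparty.org"}  # Add vendor domains
--     client_domains = {"customer.com", "businessclient.io"}  # Add client domains
--     automated_patterns = [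
--         "noreply@", "no-reply@", "bot@", "notification@", "alerts@",
--         "system@", "support@", "teams.microsoft.com", "zoom.us",
--         "slack.com", "webex.com", "atlassian.com"
--     ]  # Automated system patterns
--
--     # Categorization logic
--     if any(sender_email.endswith(f"@{domain}") for domain in internal_domains):
--         return "Internal"
--     elif any(sender_email.endswith(f"@{domain}") for domain in vendor_domains):
--         return "Vendor"
--     elif any(sender_email.endswith(f"@{domain}") for domain in client_domains):
--         return "Client"
--     elif any(pattern in sender_email for pattern in automated_patterns):
--         return "Automated"
--     else:
--         return "External"  # If not categorized, label as External
-- ===== SOURCE B (Python) =====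
-- _DOMAIN_CATEGORIES = {
--     "glynac.ai": "Internal", "greentree.group": "Internal", "springer.capital": "Internal",
--     "supplier.com": "Vendor", "thirdparty.org": "Vendor",
--     "customer.com": "Client", "businessclient.io": "Client",
-- }
--
-- _AUTOMATED_PATTERNS = [
--     "noreply@", "no-reply@", "bot@", "notification@", "alerts@",
--     "system@", "support@", "teams.microsoft.com", "zoom.us",
--     "slack.com", "webex.com", "atlassian.com",
-- ]
--
--
-- def categorize_sender(sender_email):
--     """Categorizes the sender as Internal, Vendor, or Client based on domain."""
--     if not sender_email:
--         return "Unknown"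
--     s = sender_email.lower()
--     if "@" in s:
--         category = _DOMAIN_CATEGORIES.get(s.rsplit("@", 1)[-1])
--         if category is not None:
--             return category
--     for pattern in _AUTOMATED_PATTERNS:
--         if pattern in s:
--             return "Automated"
--     return "External"
-- ===== Notes on version B (the rewrite author's own statement) =====
-- stated objective: simpler
-- what changed: B replaces A's three per-category endswith scans over domain sets by a single domain-to-category dict looked up once on the domain part after the last at-sign (only when the address contains one), keeping the automated-pattern fallback.
import Mathlib
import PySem

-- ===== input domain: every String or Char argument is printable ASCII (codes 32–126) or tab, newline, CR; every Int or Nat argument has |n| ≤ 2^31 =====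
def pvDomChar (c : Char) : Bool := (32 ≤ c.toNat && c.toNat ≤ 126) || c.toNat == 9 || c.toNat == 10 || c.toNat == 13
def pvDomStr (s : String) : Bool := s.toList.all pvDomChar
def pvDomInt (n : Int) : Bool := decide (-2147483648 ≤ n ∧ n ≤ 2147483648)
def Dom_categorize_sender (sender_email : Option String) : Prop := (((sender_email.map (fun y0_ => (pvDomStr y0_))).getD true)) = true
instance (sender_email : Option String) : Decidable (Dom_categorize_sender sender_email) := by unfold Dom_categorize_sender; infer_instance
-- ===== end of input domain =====

-- B replaces A's three per-category endswith scans by one domain→category dict looked up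
-- on the suffix after the last '@' (objective: simpler).

-- ===== PORT A =====
def categorize_sender (sender_email : Option String) : String :=
  match sender_email with
  | none => "Unknown"
  | some se =>
    if se = "" then "Unknown" else
    let s := PySem.Str.lower se
    let internal_domains : PySem.Set String :=
      PySem.Set.ofList ["glynac.ai", "greentree.group", "springer.capital"]
    let vendor_domains : PySem.Set String := PySem.Set.ofList ["supplier.com", "thirdparty.org"]
    let client_domains : PySem.Set String := PySem.Set.ofList ["customer.com", "businessclient.io"]
    let automated_patterns : List String :=
      ["noreply@", "no-reply@", "bot@", "notification@", "alerts@",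
       "system@", "support@", "teams.microsoft.com", "zoom.us",
       "slack.com", "webex.com", "atlassian.com"]
    if internal_domains.any (fun d => PySem.Str.endswith s ("@" ++ d)) then "Internal"
    else if vendor_domains.any (fun d => PySem.Str.endswith s ("@" ++ d)) then "Vendor"
    else if client_domains.any (fun d => PySem.Str.endswith s ("@" ++ d)) then "Client"
    else if automated_patterns.any (fun p => PySem.Str.isIn p s) then "Automated"
    else "External"

-- ===== PORT B =====
-- hand port of s.rsplit("@", 1)[-1] (PySem has no rsplit): the suffix after the LAST '@',
-- none when '@' does not occur; exact wherever B uses it, since B only consults it under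
-- the guard '"@" in s', where rsplit("@", 1) has exactly two pieces and [-1] is this suffix.
def afterLastAt : List Char → Option (List Char)
  | [] => none
  | c :: cs =>
    match afterLastAt cs with
    | some d => some d
    | none => if c = '@' then some cs else none

def rsplitAtTail (s : String) : Option String := (afterLastAt s.toList).map String.ofList

def domainCategories : PySem.Dict String String :=
  PySem.Dict.ofList
    [("glynac.ai", "Internal"), ("greentree.group", "Internal"), ("springer.capital", "Internal"),
     ("supplier.com", "Vendor"), ("thirdparty.org", "Vendor"),
     ("customer.com", "Client"), ("businessclient.io", "Client")]

def automatedPatterns : List String :=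
  ["noreply@", "no-reply@", "bot@", "notification@", "alerts@",
   "system@", "support@", "teams.microsoft.com", "zoom.us",
   "slack.com", "webex.com", "atlassian.com"]

-- the 'for pattern in _AUTOMATED_PATTERNS: if pattern in s: return "Automated"' loop
def autoLoop : List String → String → String
  | [], _ => "External"
  | p :: ps, s => if PySem.Str.isIn p s then "Automated" else autoLoop ps s

def categorize_sender_alt (sender_email : Option String) : String :=
  match sender_email with
  | none => "Unknown"
  | some se =>
    if se = "" then "Unknown" else
    let s := PySem.Str.lower se
    let viaDomain : Option String :=
      if PySem.Str.isIn "@" s then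
        match rsplitAtTail s with
        | some dom => PySem.Dict.get? domainCategories dom
        | none => none
      else none
    match viaDomain with
    | some cat => cat
    | none => autoLoop automatedPatterns s

-- ===== PRECONDITION & SPEC =====
def Spec_categorize_sender (sender_email : Option String) (out : String) : Prop := out = categorize_sender_alt sender_email
instance (sender_email : Option String) (out : String) : Decidable (Spec_categorize_sender sender_email out) := by unfold Spec_categorize_sender; infer_instance

-- ===== CLAIM (what is proved, stated in full; the proofs are below) =====
def Claim_equal_categorize_sender : Prop := ∀ (sender_email : Option String), Dom_categorize_sender sender_email → Spec_categorize_sender sender_email (categorize_sender sender_email)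

-- ===== LEMMAS AND PROOFS =====

theorem afterLastAt_eq_none_iff (t : List Char) : afterLastAt t = none ↔ '@' ∉ t := by
  induction t with
  | nil => simp [afterLastAt]
  | cons c cs ih =>
    simp only [afterLastAt]
    cases h : afterLastAt cs with
    | some d => simp_all
    | none =>
      by_cases hc : c = '@'
      · simp_all
      · simp only [if_neg hc, List.mem_cons]
        constructor
        · intro _ hor
          rcases hor with h1 | h2
          · exact hc h1.symm
          · exact (ih.mp h) h2
        · intro _; trivial

theorem afterLastAt_not_mem : ∀ (t d : List Char), afterLastAt t = some d → '@' ∉ d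
  | [], d, h => by simp [afterLastAt] at h
  | c :: cs, d, h => by
    simp only [afterLastAt] at h
    cases hcs : afterLastAt cs with
    | some d' =>
      rw [hcs] at h
      cases h
      exact afterLastAt_not_mem cs d hcs
    | none =>
      rw [hcs] at h
      split_ifs at h with hc
      cases h
      exact (afterLastAt_eq_none_iff cs).mp hcs

theorem afterLastAt_some_iff {d : List Char} (hd : '@' ∉ d) :
    ∀ (t : List Char), afterLastAt t = some d ↔ ('@' :: d) <:+ t := by
  intro t
  induction t with
  | nil => simp [afterLastAt]
  | cons c cs ih =>
    simp only [afterLastAt]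
    rw [List.suffix_cons_iff]
    cases h : afterLastAt cs with
    | some d' =>
      have hmem : '@' ∈ cs := by
        have hne : afterLastAt cs ≠ none := by simp [h]
        exact not_not.mp (mt (afterLastAt_eq_none_iff cs).mpr hne)
      simp only [Option.some.injEq]
      constructor
      · rintro rfl; exact Or.inr (ih.mp h)
      · rintro (he | hs)
        · exfalso
          injection he with h1 h2
          rw [h2] at hd
          exact hd hmem
        · have hh := ih.mpr hs
          rw [h] at hh
          injection hh
    | none =>
      have hno : '@' ∉ cs := (afterLastAt_eq_none_iff cs).mp h
      by_cases hc : c = '@'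
      · subst hc
        constructor
        · intro h0
          rw [if_pos rfl] at h0
          injection h0 with h0
          exact Or.inl (by rw [h0])
        · rintro (he | hs)
          · injection he with _ h2
            rw [if_pos rfl, h2]
          · exact absurd (hs.subset (by simp)) hno
      · simp only [if_neg hc]
        constructor
        · intro h0; cases h0
        · rintro (he | hs)
          · injection he with h1 _; exact absurd h1.symm hc
          · exact absurd (hs.subset (by simp)) hno

theorem endswith_iff_afterLastAt (s d : String) (hd : '@' ∉ d.toList) :
    PySem.Str.endswith s ("@" ++ d) = true ↔ afterLastAt s.toList = some d.toList := by
  rw [PySem.Str.endswith_eq, PySem.Chars.endswith_iff, afterLastAt_some_iff hd]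
  simp

theorem isIn_at_iff (s : String) : PySem.Str.isIn "@" s = true ↔ '@' ∈ s.toList := by
  rw [PySem.Str.isIn_iff_infix]
  simpa using List.singleton_infix_iff '@' s.toList

theorem autoLoop_eq (ps : List String) (s : String) :
    autoLoop ps s = if ps.any (fun p => PySem.Str.isIn p s) then "Automated" else "External" := by
  induction ps with
  | nil => rfl
  | cons p ps ih =>
    simp only [autoLoop, ih, List.any_cons, Bool.or_eq_true, PySem.Str.isIn_eq]
    by_cases h : PySem.Chars.isIn p.toList s.toList = true
    · simp [h]
    · simp [h]

theorem get?_domainCategories (k : String) :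
    PySem.Dict.get? domainCategories k =
      if k = "glynac.ai" then some "Internal"
      else if k = "greentree.group" then some "Internal"
      else if k = "springer.capital" then some "Internal"
      else if k = "supplier.com" then some "Vendor"
      else if k = "thirdparty.org" then some "Vendor"
      else if k = "customer.com" then some "Client"
      else if k = "businessclient.io" then some "Client"
      else none := by
  have h : domainCategories = PySem.Dict.mk
    [("glynac.ai", "Internal"), ("greentree.group", "Internal"), ("springer.capital", "Internal"),
     ("supplier.com", "Vendor"), ("thirdparty.org", "Vendor"),
     ("customer.com", "Client"), ("businessclient.io", "Client")] := by decide
  rw [h]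
  simp only [PySem.Dict.get?_mk_cons, beq_iff_eq]
  simp [eq_comm, PySem.Dict.get?]

-- ===== VERDICT (by name: the statement is the Claim_ definition above) =====
set_option maxHeartbeats 1000000 in
theorem categorize_sender_spec : Claim_equal_categorize_sender := by
  intro sender_email _
  unfold Spec_categorize_sender categorize_sender categorize_sender_alt
  cases sender_email with
  | none => rfl
  | some se =>
    by_cases hse : se = ""
    · simp [hse]
    simp only [if_neg hse]
    set s := PySem.Str.lower se with hs
    simp only [autoLoop_eq]
    by_cases hat : '@' ∈ s.toList
    · -- there is a suffix after the last '@'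
      cases h : afterLastAt s.toList with
      | none => exact absurd ((afterLastAt_eq_none_iff _).mp h) (by simpa using hat)
      | some d =>
        have hdm : '@' ∉ d := afterLastAt_not_mem _ _ h
        have hin : PySem.Str.isIn "@" s = true := (isIn_at_iff s).mpr hat
        have hend : ∀ dom : String, '@' ∉ dom.toList →
            (PySem.Str.endswith s ("@" ++ dom) = true ↔ d = dom.toList) := by
          intro dom hdom
          rw [endswith_iff_afterLastAt s dom hdom, h]
          simp [eq_comm]
        have edom : ∀ dom : String, '@' ∉ dom.toList →
            PySem.Str.endswith s ("@" ++ dom) = decide (d = dom.toList) := by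
          intro dom hdom
          by_cases hd : d = dom.toList
          · rw [(hend dom hdom).mpr hd]
            simp [hd]
          · simp only [hd, decide_false]
            exact (Bool.not_eq_true _).mp (fun hc => hd ((hend dom hdom).mp hc))
        have keyiff : ∀ key : String, (String.ofList d = key) ↔ d = key.toList := by
          intro key
          constructor
          · intro hk; rw [← hk, String.toList_ofList]
          · intro hk; rw [hk, String.ofList_toList]
        simp only [rsplitAtTail, h, Option.map_some, hin]
        rw [get?_domainCategories]
        simp only [show (PySem.Set.ofList ["glynac.ai", "greentree.group", "springer.capital"] :
              PySem.Set String) = ["glynac.ai", "greentree.group", "springer.capital"] from rfl,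
          show (PySem.Set.ofList ["supplier.com", "thirdparty.org"] : PySem.Set String) =
              ["supplier.com", "thirdparty.org"] from rfl,
          show (PySem.Set.ofList ["customer.com", "businessclient.io"] : PySem.Set String) =
              ["customer.com", "businessclient.io"] from rfl,
          List.any_cons, List.any_nil]
        rw [edom "glynac.ai" (by decide), edom "greentree.group" (by decide),
            edom "springer.capital" (by decide), edom "supplier.com" (by decide),
            edom "thirdparty.org" (by decide), edom "customer.com" (by decide),
            edom "businessclient.io" (by decide)]
        simp only [keyiff, decide_eq_true_eq, Bool.or_eq_true, Bool.or_false, automatedPatterns]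
        clear hend hin h hat hdm
        by_cases h1 : d = "glynac.ai".toList
        · simp_all
        by_cases h2 : d = "greentree.group".toList
        · simp_all
        by_cases h3 : d = "springer.capital".toList
        · simp_all
        by_cases h4 : d = "supplier.com".toList
        · simp_all
        by_cases h5 : d = "thirdparty.org".toList
        · simp_all
        by_cases h6 : d = "customer.com".toList
        · simp_all
        by_cases h7 : d = "businessclient.io".toList
        · simp_all
        clear edom keyiff
        simp_all
    · -- no '@' at all: every endswith and the "@"-guard are false
      have hin : PySem.Chars.isIn ['@'] s.toList = false := by
        have := (isIn_at_iff s).not.mpr hat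
        simpa [PySem.Str.isIn_eq] using (Bool.not_eq_true _).mp (by simpa using this)
      have hend : ∀ p : List Char, PySem.Chars.endswith s.toList ('@' :: p) ≠ true := by
        intro p hp
        exact hat (((PySem.Chars.endswith_iff _ _).mp hp).subset (by simp))
      simp [hin, hend, PySem.Set.ofList, PySem.Set.add, PySem.Set.empty, automatedPatterns]
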